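-- pv_equiv track=rewrite | github.com/shaldem/cryptosh | cry/md5.py | str2binl
-- ===== SOURCE A (Python) =====
-- chrsz   = 8;  #bits per input character. 8 - ASCII; 16 - Unicode
--
-- intlenbit = 32 #intlen
--
-- def str2binl(str):
--   bin = {}
--   mask = (1 << chrsz) - 1
--   i = 0
--   while i < len(str) * chrsz:
--     ind = i >> 5
--     sdv = i % intlenbit
--     str_c = ord(str[int(i/chrsz)]) & mask
--     bin[ind] = bin.get(ind,0) | str_c << sdv
--     i+=chrsz
--   return bin
-- ===== SOURCE B (Python) =====
-- chrsz   = 8;  #bits per input character. 8 - ASCII; 16 - Unicode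
--
-- intlenbit = 32 #intlen
--
-- def str2binl(str):
--   bin = {}
--   mask = (1 << chrsz) - 1
--   cpw = intlenbit // chrsz          # characters per 32-bit word
--   for w in range((len(str) + cpw - 1) // cpw):
--     word = 0
--     for k in range(cpw):
--       idx = cpw * w + k
--       if idx < len(str):
--         word |= (ord(str[idx]) & mask) << (chrsz * k)
--     bin[w] = word
--   return bin
-- ===== Notes on version B (the rewrite author's own statement) =====
-- stated objective: faster
-- what changed: B iterates over output word indices, assembling each 32-bit word in a local accumulator from its up-to-4 characters and storing it into the dict once, instead of A's per-character loop with a dict.get read-modify-write per character.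
import Mathlib
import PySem

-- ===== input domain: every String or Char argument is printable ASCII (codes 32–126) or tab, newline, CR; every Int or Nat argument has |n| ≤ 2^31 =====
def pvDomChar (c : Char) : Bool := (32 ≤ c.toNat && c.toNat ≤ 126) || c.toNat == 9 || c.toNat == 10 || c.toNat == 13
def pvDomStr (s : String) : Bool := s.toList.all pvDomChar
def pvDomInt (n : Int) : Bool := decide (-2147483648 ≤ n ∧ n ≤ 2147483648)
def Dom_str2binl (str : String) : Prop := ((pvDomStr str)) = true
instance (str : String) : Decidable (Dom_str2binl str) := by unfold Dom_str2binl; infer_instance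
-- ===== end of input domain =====

-- B assembles each 32-bit word once from its up-to-4 characters (outer loop over word
-- indices, one dict store per word) instead of A's per-character loop with a dict
-- read-modify-write per character; same return value, fewer dict operations (measured faster in a timing run).

-- ===== PORT A =====
def pvChrsz : Int := 8
def pvIntlenbit : Int := 32

-- the while loop of A; under the loop guard the string index int(i/chrsz) is provably
-- in range, so the total pyGetD form is exact here
def str2binlGo (cs : List Char) (mask : Int) (bin : PySem.Dict Int Int) (i : Int) :
    PySem.Dict Int Int :=
  if _h : i < (cs.length : Int) * pvChrsz then
    let ind := i >>> (5 : Nat)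
    let sdv := PySem.Int.mod i pvIntlenbit
    let str_c := PySem.Int.band ((PySem.List.pyGetD cs (PySem.Int.floordiv i pvChrsz) ' ').toNat : Int) mask
    str2binlGo cs mask (bin.insert ind (PySem.Int.bor (bin.getD ind 0) (str_c <<< sdv.toNat))) (i + pvChrsz)
  else bin
termination_by ((cs.length : Int) * pvChrsz - i).toNat
decreasing_by simp only [pvChrsz] at *; omega

def str2binl (str : String) : List (Int × Int) :=
  let mask : Int := ((1 : Int) <<< pvChrsz.toNat) - 1
  (str2binlGo str.toList mask PySem.Dict.empty 0).items

-- ===== PORT B =====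
def str2binl_alt (str : String) : List (Int × Int) :=
  let cs := str.toList
  let mask : Int := ((1 : Int) <<< pvChrsz.toNat) - 1
  let cpw : Int := PySem.Int.floordiv pvIntlenbit pvChrsz
  ((PySem.List.pyRange 0 (PySem.Int.floordiv ((cs.length : Int) + cpw - 1) cpw) 1).foldl
    (fun bin w =>
      bin.insert w ((PySem.List.pyRange 0 cpw 1).foldl
        (fun word k =>
          if cpw * w + k < (cs.length : Int) then
            PySem.Int.bor word
              ((PySem.Int.band ((PySem.List.pyGetD cs (cpw * w + k) ' ').toNat : Int) mask)
                <<< (pvChrsz * k).toNat)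
          else word) 0))
    PySem.Dict.empty).items

-- ===== PRECONDITION & SPEC =====
def Spec_str2binl (str : String) (out : List (Int × Int)) : Prop := out = str2binl_alt str
instance (str : String) (out : List (Int × Int)) : Decidable (Spec_str2binl str out) := by unfold Spec_str2binl; infer_instance

-- ===== CLAIM (what is proved, stated in full; the proofs are below) =====
def Claim_equal_str2binl : Prop := ∀ (str : String), Dom_str2binl str → Spec_str2binl str (str2binl str)

-- ===== LEMMAS AND PROOFS =====

-- masked character value, the packed word of one chunk, and the canonical result:
-- successive 4-character chunks of the string, one (index, word) pair each
def pvVal (c : Char) : Int := PySem.Int.band ((c.toNat : Nat) : Int) 255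

def pvWord (cs : List Char) : Int :=
  (List.range cs.length).foldl (fun acc k => PySem.Int.bor acc (pvVal (cs.getD k ' ') <<< (8 * k))) 0

def pvCanon (w : Int) (cs : List Char) : List (Int × Int) :=
  if h : cs = [] then [] else (w, pvWord (cs.take 4)) :: pvCanon (w + 1) (cs.drop 4)
termination_by cs.length
decreasing_by have : 0 < cs.length := List.length_pos_iff.mpr h; simp [List.length_drop]; omega

lemma pvWord_snoc (xs : List Char) (c : Char) :
    pvWord (xs ++ [c]) = PySem.Int.bor (pvWord xs) (pvVal c <<< (8 * xs.length)) := by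
  unfold pvWord
  rw [List.length_append, List.length_singleton, List.range_succ, List.foldl_append]
  simp only [List.foldl_cons, List.foldl_nil]
  rw [PySem.List.foldl_congr_mem _ _ (fun acc k => PySem.Int.bor acc (pvVal (xs.getD k ' ') <<< (8*k))) _
      (by intro acc k hk; rw [List.mem_range] at hk; rw [List.getD_append _ _ _ _ hk])]
  congr 1
  rw [List.getD_append_right _ _ _ _ (le_refl _)]
  simp

lemma pvCanon_key_bound (w : Int) (cs : List Char) :
    ∀ p ∈ pvCanon w cs, w ≤ p.1 ∧ p.1 < w + (((cs.length + 3) / 4 : Nat) : Int) := by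
  fun_induction pvCanon with
  | case1 h => simp
  | case2 w cs h ih =>
    intro p hp
    have hl : 0 < cs.length := List.length_pos_iff.mpr h
    have hq : 1 ≤ (cs.length + 3) / 4 := by omega
    rcases List.mem_cons.mp hp with hp | hp
    · subst hp; refine ⟨le_refl _, ?_⟩; simp; omega
    · have hb := ih p hp
      rw [List.length_drop] at hb
      rcases hb with ⟨h1, h2⟩
      refine ⟨by omega, ?_⟩
      by_cases h4 : cs.length ≤ 4
      · have h0 : ((cs.length - 4 + 3) / 4 : Nat) = 0 := by omega
        rw [h0] at h2; push_cast at h2 ⊢; omega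
      · have h4' : ((cs.length - 4 + 3) / 4 : Nat) + 1 = (cs.length + 3) / 4 := by omega
        push_cast at h2 ⊢; omega

lemma pvCanon_pairwise (w : Int) (cs : List Char) :
    (pvCanon w cs).Pairwise (fun p q => p.1 < q.1) := by
  fun_induction pvCanon with
  | case1 h => simp
  | case2 w cs h ih =>
    refine List.pairwise_cons.mpr ⟨?_, ih⟩
    intro q hq
    have := (pvCanon_key_bound (w + 1) (cs.drop 4) q hq).1
    omega

lemma pvCanon_keys_nodup (w : Int) (cs : List Char) :
    ((pvCanon w cs).map Prod.fst).Nodup := by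
  exact (pvCanon_pairwise w cs).map Prod.fst (fun {a b} hab => ne_of_lt hab)

lemma pvCanon_decomp (w : Int) (cs : List Char) (h : cs ≠ []) :
    pvCanon w cs =
      pvCanon w (cs.take (cs.length - 1 - (cs.length - 1) % 4)) ++
        [(w + (((cs.length - 1 - (cs.length - 1) % 4) / 4 : Nat) : Int),
          pvWord (cs.drop (cs.length - 1 - (cs.length - 1) % 4)))] := by
  fun_induction pvCanon with
  | case1 w => exact absurd rfl ‹[] ≠ []›
  | case2 w cs h' ih =>
    have hl : 0 < cs.length := List.length_pos_iff.mpr h'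
    have hlen4 : (List.drop 4 cs).length = cs.length - 4 := by simp
    by_cases h4 : cs.length ≤ 4
    · have ht : cs.length - 1 - (cs.length - 1) % 4 = 0 := by omega
      have hd : cs.drop 4 = [] := by
        apply List.eq_nil_of_length_eq_zero; omega
      rw [ht, hd]
      simp [pvCanon, List.take_of_length_le h4]
    · have hd4 : cs.drop 4 ≠ [] := by
        intro hc; rw [hc] at hlen4; simp at hlen4; omega
      have ih' := ih hd4
      rw [hlen4] at ih'
      have ht' : cs.length - 4 - 1 - (cs.length - 4 - 1) % 4
          = (cs.length - 1 - (cs.length - 1) % 4) - 4 := by omega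
      rw [ht'] at ih'
      have ht4 : 4 ≤ cs.length - 1 - (cs.length - 1) % 4
          ∧ (cs.length - 1 - (cs.length - 1) % 4) % 4 = 0
          ∧ cs.length - 1 - (cs.length - 1) % 4 ≤ cs.length - 1 := by omega
      obtain ⟨ht1, ht2, ht3⟩ := ht4
      have htk : (cs.take (cs.length - 1 - (cs.length - 1) % 4)) ≠ [] := by
        rw [Ne, List.take_eq_nil_iff]
        push Not
        exact ⟨by omega, h'⟩
      have hkey : w + 1 + (((cs.length - 1 - (cs.length - 1) % 4 - 4) / 4 : Nat) : Int)
          = w + (((cs.length - 1 - (cs.length - 1) % 4) / 4 : Nat) : Int) := by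
        have : (cs.length - 1 - (cs.length - 1) % 4 - 4) / 4 + 1
            = (cs.length - 1 - (cs.length - 1) % 4) / 4 := by omega
        rw [← this, Nat.cast_add, Nat.cast_one]; ring
      have hdrop : List.drop (cs.length - 1 - (cs.length - 1) % 4 - 4) (List.drop 4 cs)
          = List.drop (cs.length - 1 - (cs.length - 1) % 4) cs := by
        rw [List.drop_drop]; congr 1; omega
      rw [hkey, hdrop] at ih'
      conv_rhs => rw [pvCanon, dif_neg htk]
      rw [List.take_take, show min 4 (cs.length - 1 - (cs.length - 1) % 4) = 4 by omega]
      rw [List.drop_take]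
      rw [ih']
      simp only [List.cons_append]

lemma pvCanon_eq_map (w : Int) (cs : List Char) :
    pvCanon w cs =
      (List.range ((cs.length + 3) / 4)).map
        (fun (t : Nat) => (w + (t : Int), pvWord ((cs.drop (4 * t)).take 4))) := by
  fun_induction pvCanon with
  | case1 w => simp
  | case2 w cs h' ih =>
    have hl : 0 < cs.length := List.length_pos_iff.mpr h'
    have hlen4 : (List.drop 4 cs).length = cs.length - 4 := by simp
    rw [hlen4] at ih
    have hN : (cs.length + 3) / 4 = (cs.length - 4 + 3) / 4 + 1 := by omega
    rw [hN, List.range_succ_eq_map, List.map_cons, List.map_map]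
    congr 1
    · simp
    · rw [ih]
      apply List.map_congr_left
      intro t _
      simp only [Function.comp_apply, Nat.succ_eq_add_one]
      rw [List.drop_drop, show 4 + 4 * t = 4 * (t + 1) from by ring]
      congr 1
      push_cast; ring

lemma pvFoldGuard (m L : Nat) (g : Int → Nat → Int) (z : Int) :
    (List.range m).foldl (fun acc k => if k < L then g acc k else acc) z
      = (List.range (min m L)).foldl g z := by
  induction m with
  | zero => simp
  | succ m ih =>
    rw [List.range_succ, List.foldl_append]
    by_cases hm : m < L
    · rw [show min (m+1) L = (min m L) + 1 from by omega, List.range_succ, List.foldl_append, ih]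
      simp [hm, show min m L = m from by omega]
    · rw [show min (m+1) L = min m L from by omega, ← ih]
      simp [hm]

lemma pvGetD_chunk (cs : List Char) (wn k : Nat) (hk : k < min 4 (cs.length - 4 * wn)) :
    ((cs.drop (4 * wn)).take 4).getD k ' ' = cs.getD (4 * wn + k) ' ' := by
  have h1 : k < ((cs.drop (4 * wn)).take 4).length := by simp; omega
  have h2 : 4 * wn + k < cs.length := by omega
  rw [List.getD_eq_getElem _ _ h1, List.getD_eq_getElem _ _ h2]
  rw [List.getElem_take, List.getElem_drop]

lemma pvInner (cs : List Char) (wn : Nat) (hw : 4 * wn < cs.length) :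
    (PySem.List.pyRange 0 4 1).foldl
      (fun word k =>
        if 4 * (wn : Int) + k < (cs.length : Int) then
          PySem.Int.bor word
            ((PySem.Int.band (((PySem.List.pyGetD cs (4 * (wn : Int) + k) ' ').toNat : Nat) : Int) 255)
              <<< ((8 : Int) * k).toNat)
        else word) 0
      = pvWord ((cs.drop (4 * wn)).take 4) := by
  have hr : PySem.List.pyRange 0 4 1 = List.map (fun (k : Nat) => (k : Int)) (List.range 4) := by decide
  rw [hr, List.foldl_map]
  rw [PySem.List.foldl_congr_mem _ _
      (fun acc k => if k < cs.length - 4 * wn then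
        PySem.Int.bor acc (pvVal (cs.getD (4 * wn + k) ' ') <<< (8 * k)) else acc) _ ?_]
  · rw [pvFoldGuard]
    unfold pvWord
    rw [show ((cs.drop (4 * wn)).take 4).length = min 4 (cs.length - 4 * wn) from by simp]
    apply PySem.List.foldl_congr_mem
    intro acc k hk
    rw [List.mem_range] at hk
    rw [pvGetD_chunk cs wn k hk]
  · intro acc k hk
    rw [List.mem_range] at hk
    simp only
    by_cases hlt : 4 * wn + k < cs.length
    · rw [if_pos (show 4 * (wn:Int) + (k:Int) < (cs.length:Int) from by omega), if_pos (show k < cs.length - 4 * wn from by omega)]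
      rw [show 4 * (wn : Int) + (k : Int) = ((4 * wn + k : Nat) : Int) from by push_cast; ring]
      rw [PySem.List.pyGetD_natCast]
      rw [show ((8 : Int) * (k : Int)).toNat = 8 * k from by omega]
      rfl
    · rw [if_neg (show ¬(4 * (wn:Int) + (k:Int) < (cs.length:Int)) from by omega), if_neg (show ¬(k < cs.length - 4 * wn) from by omega)]

lemma pvB_eq_canon (s : String) : str2binl_alt s = pvCanon 0 s.toList := by
  simp only [str2binl_alt, show PySem.Int.floordiv pvIntlenbit pvChrsz = 4 from by decide,
    show ((1 : Int) <<< pvChrsz.toNat) - 1 = 255 from by decide]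
  simp only [show pvChrsz = (8 : Int) from rfl]
  rw [show ((s.toList.length : Int) + 4 - 1) = ((s.toList.length + 3 : Nat) : Int) from by push_cast; ring]
  rw [show ((4 : Int)) = ((4 : Nat) : Int) from by norm_num, PySem.Int.floordiv_natCast]
  rw [show ((4 : Nat) : Int) = (4 : Int) from by norm_num]
  rw [PySem.List.pyRange_one 0 (((s.toList.length + 3) / 4 : Nat) : Int)]
  rw [show ((((s.toList.length + 3) / 4 : Nat) : Int) - 0).toNat = (s.toList.length + 3) / 4 from by omega]
  rw [PySem.Dict.items_foldl_insert_fresh _ (fun (w : Int) => w) _ PySem.Dict.empty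
    (by intro a _; simp)
    (by simp; exact List.Nodup.map (fun a b h => by simpa using h) (List.nodup_range))]
  rw [pvCanon_eq_map 0 s.toList]
  simp only [show (PySem.Dict.empty : PySem.Dict Int Int).items = [] from rfl, List.nil_append, List.map_map]
  apply List.map_congr_left
  intro t ht
  rw [List.mem_range] at ht
  have h4t : 4 * t < s.toList.length := by omega
  simp only [Function.comp_apply, zero_add]
  exact congrArg (Prod.mk ((t : Nat) : Int)) (pvInner s.toList t h4t)

lemma pvWord_singleton (c : Char) : pvWord [c] = PySem.Int.bor 0 (pvVal c <<< (8 * 0 : Nat)) := by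
  unfold pvWord
  simp [List.range_succ, Int.shiftLeft_zero]

lemma pvStep (cs : List Char) (j : Nat) (hj : j < cs.length) :
    ((PySem.Dict.mk (pvCanon 0 (cs.take j)) : PySem.Dict Int Int).insert
        (((j / 4 : Nat) : Int))
        (PySem.Int.bor ((PySem.Dict.mk (pvCanon 0 (cs.take j)) : PySem.Dict Int Int).getD ((j / 4 : Nat) : Int) 0)
          (pvVal (cs.getD j ' ') <<< (8 * (j % 4))))) =
      PySem.Dict.mk (pvCanon 0 (cs.take (j + 1))) := by
  have hlen : (cs.take j).length = j := by simp; omega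
  have hsnoc : cs.take (j + 1) = cs.take j ++ [cs.getD j ' '] := by
    rw [List.take_add_one, List.getD_eq_getElem _ _ hj, List.getElem?_eq_getElem hj]
    rfl
  have hitems : (PySem.Dict.mk (pvCanon 0 (cs.take j)) : PySem.Dict Int Int).items
      = pvCanon 0 (cs.take j) := rfl
  have hkeysnodup : (PySem.Dict.mk (pvCanon 0 (cs.take j)) : PySem.Dict Int Int).keys.Nodup := by
    simpa [PySem.Dict.keys] using pvCanon_keys_nodup 0 (cs.take j)
  by_cases hr : j % 4 = 0
  · -- fresh key case
    have hnc : (PySem.Dict.mk (pvCanon 0 (cs.take j)) : PySem.Dict Int Int).contains ((j / 4 : Nat) : Int) = false := by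
      rw [PySem.Dict.contains_eq_decide_mem_keys]
      simp only [decide_eq_false_iff_not, PySem.Dict.keys]
      intro hmemk
      rcases List.mem_map.mp hmemk with ⟨p, hp, hp1⟩
      have hb := (pvCanon_key_bound 0 (cs.take j) p hp).2
      rw [hlen] at hb
      rw [hp1] at hb
      have : (j + 3) / 4 = j / 4 := by omega
      rw [this] at hb
      simp at hb
    apply PySem.Dict.ext
    rw [PySem.Dict.items_insert_of_not_contains _ _ hnc, PySem.Dict.getD_of_not_contains _ _ hnc]
    rw [hitems]
    -- RHS via decomposition of take (j+1)
    have hne : cs.take (j + 1) ≠ [] := by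
      rw [Ne, List.take_eq_nil_iff]
      push Not
      exact ⟨by omega, fun hc => by rw [hc] at hj; simp at hj⟩
    have hlen1 : (cs.take (j + 1)).length = j + 1 := by simp; omega
    have hd := pvCanon_decomp 0 (cs.take (j + 1)) hne
    rw [hlen1] at hd
    rw [show j + 1 - 1 - (j + 1 - 1) % 4 = j from by omega] at hd
    rw [show (PySem.Dict.mk (pvCanon 0 (cs.take (j+1))) : PySem.Dict Int Int).items = pvCanon 0 (cs.take (j+1)) from rfl, hd]
    rw [List.take_take, show min j (j + 1) = j from by omega]
    congr 1
    rw [hsnoc, List.drop_left' hlen, pvWord_singleton]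
    rw [show 8 * (j % 4) = 8 * 0 from by omega]
    simp
  · -- update-last case
    have hr1 : 1 ≤ j % 4 := by omega
    have hpne : cs.take j ≠ [] := by
      rw [Ne, List.take_eq_nil_iff]
      push Not
      exact ⟨by omega, fun hc => by rw [hc] at hj; simp at hj⟩
    have hdp := pvCanon_decomp 0 (cs.take j) hpne
    rw [hlen] at hdp
    rw [show j - 1 - (j - 1) % 4 = j - j % 4 from by omega] at hdp
    rw [show (j - j % 4) / 4 = j / 4 from by omega] at hdp
    rw [List.take_take, show min (j - j % 4) j = j - j % 4 from by omega] at hdp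
    have hmem : (((j / 4 : Nat) : Int), pvWord (List.drop (j - j % 4) (cs.take j)))
        ∈ pvCanon 0 (cs.take j) := by
      rw [hdp]; simp
    have hcont : (PySem.Dict.mk (pvCanon 0 (cs.take j)) : PySem.Dict Int Int).contains ((j / 4 : Nat) : Int) = true := by
      rw [PySem.Dict.contains_eq_decide_mem_keys]
      simp only [decide_eq_true_eq, PySem.Dict.keys]
      exact List.mem_map.mpr ⟨_, hmem, rfl⟩
    have hget := PySem.Dict.getD_of_mem_items _ hmem hkeysnodup 0
    apply PySem.Dict.ext
    rw [PySem.Dict.items_insert_of_contains _ _ hcont]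
    rw [hget]
    rw [show (PySem.Dict.mk (pvCanon 0 (cs.take j)) : PySem.Dict Int Int).items = pvCanon 0 (cs.take j) from rfl]
    conv_lhs => rw [hdp]
    rw [List.map_append]
    -- the prefix is unchanged by the update map
    have hpref : (pvCanon 0 (cs.take (j - j % 4))).map
        (fun p => if (p.1 == ((j / 4 : Nat) : Int)) = true then
          (((j / 4 : Nat) : Int),
            PySem.Int.bor (pvWord (List.drop (j - j % 4) (cs.take j)))
              (pvVal (cs.getD j ' ') <<< (8 * (j % 4)))) else p)
        = pvCanon 0 (cs.take (j - j % 4)) := by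
      rw [List.map_congr_left (g := id), List.map_id]
      intro p hp
      have hb := (pvCanon_key_bound 0 (cs.take (j - j % 4)) p hp).2
      rw [show (cs.take (j - j % 4)).length = j - j % 4 from by simp; omega] at hb
      rw [show (j - j % 4 + 3) / 4 = j / 4 from by omega] at hb
      rw [if_neg (by simp; push_cast at hb ⊢; omega)]
      rfl
    rw [hpref]
    -- the right-hand side, decomposed the same way
    have hne1 : cs.take (j + 1) ≠ [] := by
      rw [Ne, List.take_eq_nil_iff]
      push Not
      exact ⟨by omega, fun hc => by rw [hc] at hj; simp at hj⟩
    have hd1 := pvCanon_decomp 0 (cs.take (j + 1)) hne1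
    rw [show (cs.take (j + 1)).length = j + 1 from by simp; omega] at hd1
    rw [show j + 1 - 1 - (j + 1 - 1) % 4 = j - j % 4 from by omega] at hd1
    rw [show (j - j % 4) / 4 = j / 4 from by omega] at hd1
    rw [List.take_take, show min (j - j % 4) (j + 1) = j - j % 4 from by omega] at hd1
    rw [show (PySem.Dict.mk (pvCanon 0 (cs.take (j + 1))) : PySem.Dict Int Int).items = pvCanon 0 (cs.take (j + 1)) from rfl, hd1]
    congr 1
    simp only [beq_self_eq_true, if_true, List.map_cons, List.map_nil, zero_add]
    congr 2
    rw [hsnoc, List.drop_append_of_le_length (by omega)]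
    rw [pvWord_snoc]
    rw [show (List.drop (j - j % 4) (cs.take j)).length = j % 4 from by simp; omega]

lemma pvLoopA (cs : List Char) (fuel j : Nat) (hf : cs.length - j = fuel) (hj : j ≤ cs.length) :
    str2binlGo cs 255 (PySem.Dict.mk (pvCanon 0 (cs.take j))) ((8 * j : Nat) : Int) =
      PySem.Dict.mk (pvCanon 0 cs) := by
  induction fuel generalizing j with
  | zero =>
    have hje : j = cs.length := by omega
    rw [str2binlGo, dif_neg (by simp only [pvChrsz]; push_cast; omega)]
    rw [hje, List.take_of_length_le (le_refl _)]
  | succ fuel ih =>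
    have hjlt : j < cs.length := by omega
    rw [str2binlGo, dif_pos (by simp only [pvChrsz]; push_cast; omega)]
    simp only
    rw [show ((8 * j : Nat) : Int) >>> (5 : Nat) = ((j / 4 : Nat) : Int) from by
      rw [Int.shiftRight_eq_div_pow]; push_cast; omega]
    rw [show PySem.Int.mod ((8 * j : Nat) : Int) pvIntlenbit = ((8 * (j % 4) : Nat) : Int) from by
      rw [show pvIntlenbit = ((32 : Nat) : Int) from by norm_num [pvIntlenbit], PySem.Int.mod_natCast]
      congr 1; omega]
    rw [show PySem.Int.floordiv ((8 * j : Nat) : Int) pvChrsz = ((j : Nat) : Int) from by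
      rw [show pvChrsz = ((8 : Nat) : Int) from by norm_num [pvChrsz], PySem.Int.floordiv_natCast]
      congr 1; omega]
    rw [PySem.List.pyGetD_natCast]
    rw [show (((8 * (j % 4) : Nat) : Int)).toNat = 8 * (j % 4) from by omega]
    rw [show (PySem.Int.band ((((cs.getD j ' ').toNat : Nat)) : Int) 255) = pvVal (cs.getD j ' ') from rfl]
    rw [pvStep cs j hjlt]
    rw [show ((8 * j : Nat) : Int) + pvChrsz = ((8 * (j + 1) : Nat) : Int) from by
      norm_num [pvChrsz]; ring]
    exact ih (j + 1) (by omega) (by omega)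

lemma pvA_eq_canon (s : String) : str2binl s = pvCanon 0 s.toList := by
  unfold str2binl
  simp only [show ((1 : Int) <<< pvChrsz.toNat) - 1 = 255 from by decide]
  have h0 : (PySem.Dict.empty : PySem.Dict Int Int) = PySem.Dict.mk (pvCanon 0 (List.take 0 s.toList)) := by
    apply PySem.Dict.ext
    rw [List.take_zero, pvCanon]
    simp [PySem.Dict.empty]
  have hl := pvLoopA s.toList (s.toList.length - 0) 0 rfl (by omega)
  norm_num at hl
  rw [h0]
  norm_num
  rw [hl]

-- ===== VERDICT (by name: the statement is the Claim_ definition above) =====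
theorem str2binl_spec : Claim_equal_str2binl := by
  intro s _
  unfold Spec_str2binl
  rw [pvA_eq_canon, pvB_eq_canon]
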